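-- pv_equiv track=rewrite | github.com/PavelGarlor/Chess | game/move_generation/bitboard_utilities.py | compute_pawn_attacks
-- ===== SOURCE A (Python) =====
-- def compute_pawn_attacks(sq: int, white=True) -> int:
--     attacks = 0
--     x, y = sq % 8, sq // 8
--     dy = 1 if white else -1
--     for dx in [-1, 1]:
--         nx, ny = x + dx, y + dy
--         if 0 <= nx < 8 and 0 <= ny < 8:
--             attacks |= 1 << (ny*8 + nx)
--     return attacks
-- ===== SOURCE B (Python) =====
-- def compute_pawn_attacks(sq: int, white=True) -> int:
--     ny, x = divmod(sq, 8)
--     ny += 1 if white else -1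
--     if 0 <= ny < 8:
--         return ((0b101 << x >> 1) & 0xFF) << (8 * ny)
--     return 0
-- ===== Notes on version B (the rewrite author's own statement) =====
-- stated objective: simpler
-- what changed: Replaces the per-direction loop with bounds checks by a single closed-form bitboard expression: a 3-bit file mask 0b101 shifted to the pawn's file, clipped to one rank with & 0xFF, then shifted to the target rank.
import Mathlib
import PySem

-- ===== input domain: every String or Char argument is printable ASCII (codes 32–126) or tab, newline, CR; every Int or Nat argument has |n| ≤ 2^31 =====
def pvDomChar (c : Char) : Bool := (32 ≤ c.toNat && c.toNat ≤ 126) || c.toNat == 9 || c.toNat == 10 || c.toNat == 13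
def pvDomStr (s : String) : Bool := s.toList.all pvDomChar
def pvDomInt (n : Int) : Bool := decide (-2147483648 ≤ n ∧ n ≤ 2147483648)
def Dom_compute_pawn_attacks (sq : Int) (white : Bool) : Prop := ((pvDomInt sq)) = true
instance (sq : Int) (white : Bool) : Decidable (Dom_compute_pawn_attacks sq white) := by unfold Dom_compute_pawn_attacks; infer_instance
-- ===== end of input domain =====

-- B replaces A's per-direction loop and bounds checks by one closed-form mask
-- expression (file mask 0b101 shifted and clipped to a rank, then shifted to the
-- target rank); objective: simpler.


-- ===== PORT A =====
-- '1 << k' ported as '(1 : Int) <<< k.toNat'; exact because inside the taken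
-- branch the shift amount ny*8+nx is nonnegative (0 ≤ nx, 0 ≤ ny).
def compute_pawn_attacks (sq : Int) (white : Bool) : Int :=
  let attacks : Int := 0
  let x := PySem.Int.mod sq 8
  let y := PySem.Int.floordiv sq 8
  let dy : Int := if white then 1 else -1
  ([(-1 : Int), 1]).foldl (fun attacks dx =>
    let nx := x + dx
    let ny := y + dy
    if 0 ≤ nx ∧ nx < 8 ∧ 0 ≤ ny ∧ ny < 8 then
      PySem.Int.bor attacks ((1 : Int) <<< (ny * 8 + nx).toNat)
    else attacks) attacks

-- ===== PORT B =====
-- shifts ported with '.toNat' amounts; exact: x = sq % 8 ≥ 0, and 8*ny ≥ 0 in the branch.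
def compute_pawn_attacks_alt (sq : Int) (white : Bool) : Int :=
  let ny0 := PySem.Int.floordiv sq 8
  let x := PySem.Int.mod sq 8
  let ny := ny0 + (if white then 1 else -1)
  if 0 ≤ ny ∧ ny < 8 then
    (PySem.Int.band ((5 : Int) <<< x.toNat >>> 1) 255) <<< (8 * ny).toNat
  else 0

-- ===== PRECONDITION & SPEC =====
def Spec_compute_pawn_attacks (sq : Int) (white : Bool) (out : Int) : Prop := out = compute_pawn_attacks_alt sq white
instance (sq : Int) (white : Bool) (out : Int) : Decidable (Spec_compute_pawn_attacks sq white out) := by unfold Spec_compute_pawn_attacks; infer_instance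

-- ===== CLAIM (what is proved, stated in full; the proofs are below) =====
def Claim_equal_compute_pawn_attacks : Prop := ∀ (sq : Int) (white : Bool), Dom_compute_pawn_attacks sq white → Spec_compute_pawn_attacks sq white (compute_pawn_attacks sq white)

-- ===== LEMMAS AND PROOFS =====

-- Both programs depend on sq only through x = sq % 8 (which lies in [0,8)) and
-- ny = sq // 8 ± 1; with x and ny abstracted the equality is finite and decidable.
lemma pawn_key (x ny : Int) (hx0 : 0 ≤ x) (hx8 : x < 8) :
    ([(-1 : Int), 1]).foldl (fun attacks dx =>
      if 0 ≤ x + dx ∧ x + dx < 8 ∧ 0 ≤ ny ∧ ny < 8 then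
        PySem.Int.bor attacks ((1 : Int) <<< (ny * 8 + (x + dx)).toNat)
      else attacks) 0
    = (if 0 ≤ ny ∧ ny < 8 then
        (PySem.Int.band ((5 : Int) <<< x.toNat >>> 1) 255) <<< (8 * ny).toNat
      else 0) := by
  by_cases hny : 0 ≤ ny ∧ ny < 8
  · obtain ⟨hny0, hny8⟩ := hny
    interval_cases x <;> interval_cases ny <;> decide
  · simp only [List.foldl]
    rw [if_neg (by tauto), if_neg (by tauto), if_neg hny]

theorem pawn_main (sq : Int) (white : Bool) :
    compute_pawn_attacks sq white = compute_pawn_attacks_alt sq white := by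
  unfold compute_pawn_attacks compute_pawn_attacks_alt
  have hx0 : 0 ≤ PySem.Int.mod sq 8 := by
    simp [PySem.Int.mod]; exact Int.fmod_nonneg_of_pos sq (by norm_num)
  have hx8 : PySem.Int.mod sq 8 < 8 := by
    simp [PySem.Int.mod]; exact Int.fmod_lt_of_pos sq (by norm_num)
  exact pawn_key (PySem.Int.mod sq 8) (PySem.Int.floordiv sq 8 + (if white then 1 else -1)) hx0 hx8

-- ===== VERDICT (by name: the statement is the Claim_ definition above) =====
theorem compute_pawn_attacks_spec : Claim_equal_compute_pawn_attacks := by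
  intro sq white _
  exact pawn_main sq white
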